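-- pv_equiv track=rewrite | github.com/Nurdaulet-lan/LAB-3 | 1.5 ТЗКИ ЛАБ.py | create_encrypted_table
-- ===== SOURCE A (Python) =====
-- def create_encrypted_table(magic_square, text):
--     """Создает таблицу шифрования на основе магического квадрата и текста."""
--     text = text.upper().replace(" ", "")  # Убираем пробелы и приводим к верхнему регистру
--     encrypted_table = [["" for _ in range(4)] for _ in range(4)]
--     pos_map = {}
--
--     # Определяем позиции цифр в магическом квадрате
--     for i in range(4):
--         for j in range(4):
--             pos_map[magic_square[i][j]] = (i, j)
--
--     # Распределяем буквы текста по позициям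
--     for idx, char in enumerate(text):
--         if idx >= 16:
--             break  # Если текста больше 16 символов, обрезаем
--         x, y = pos_map[idx + 1]
--         encrypted_table[x][y] = char
--
--     return encrypted_table
-- ===== SOURCE B (Python) =====
-- def create_encrypted_table(magic_square, text):
--     """Read each cell directly: cell (i,j) takes text[v-1] where v = magic_square[i][j],
--     skipping values outside 1..min(len(text),16); no value->position dict, no scan of text."""
--     text = text.upper().replace(" ", "")
--     n = min(len(text), 16)
--     return [[text[magic_square[i][j] - 1] if 1 <= magic_square[i][j] <= n else ""
--              for j in range(4)] for i in range(4)]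
-- ===== Notes on version B (the rewrite author's own statement) =====
-- stated objective: simpler
-- what changed: B drops A's value-to-position dict and its scan over the text: each grid cell (i,j) is filled directly with text[v-1] where v = magic_square[i][j], in one nested comprehension over the 4x4 grid.
import Mathlib
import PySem

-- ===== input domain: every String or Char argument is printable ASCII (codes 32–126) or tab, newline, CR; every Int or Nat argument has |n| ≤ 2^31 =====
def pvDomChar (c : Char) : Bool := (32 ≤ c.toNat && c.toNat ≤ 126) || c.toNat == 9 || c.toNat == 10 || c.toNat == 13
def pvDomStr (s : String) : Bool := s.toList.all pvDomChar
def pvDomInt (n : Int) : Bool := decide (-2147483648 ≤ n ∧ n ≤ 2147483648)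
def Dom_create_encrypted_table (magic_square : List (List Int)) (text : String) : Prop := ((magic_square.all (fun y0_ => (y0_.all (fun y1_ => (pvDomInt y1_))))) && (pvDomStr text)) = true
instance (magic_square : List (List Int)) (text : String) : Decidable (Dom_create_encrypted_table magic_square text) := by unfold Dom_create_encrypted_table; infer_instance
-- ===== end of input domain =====

-- B drops A's value→position dict and its scan over the text: each grid cell is filled
-- directly from text[v-1], v being that cell's magic-square value (objective: simpler).

-- ===== PORT A =====
-- Python `encrypted_table[x][y] = char` (x, y always come from range(4), hence in range)
def pvSetCell (tbl : List (List String)) (x y : Int) (c : String) : List (List String) :=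
  PySem.List.pySetD tbl x (PySem.List.pySetD (PySem.List.pyGetD tbl x []) y c)

-- Python `[["" for _ in range(4)] for _ in range(4)]`
def pvBlank : List (List String) :=
  (List.range 4).map (fun _ => (List.range 4).map (fun _ => ("" : String)))

-- Python `for i in range(4): for j in range(4): pos_map[magic_square[i][j]] = (i, j)`
-- (an IndexError on a too-small grid is excluded by Pre_)
def pvPosMap (ms : List (List Int)) : PySem.Dict Int (Int × Int) :=
  (PySem.List.pyRange 0 4 1).foldl (fun d i =>
    (PySem.List.pyRange 0 4 1).foldl (fun d j =>
      d.insert (PySem.List.pyGetD (PySem.List.pyGetD ms i []) j 0) (i, j)) d)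
    PySem.Dict.empty

-- the body of Python's `for idx, char in enumerate(text)` loop; skipping every idx ≥ 16 is
-- exactly the `break` (the index only grows); `none` is the KeyError, excluded by Pre_
def pvStep (ms : List (List Int)) (tbl : List (List String)) (p : Int × Char) :
    List (List String) :=
  if (16 : Int) ≤ p.1 then tbl
  else match (pvPosMap ms).get? (p.1 + 1) with
    | some xy => pvSetCell tbl xy.1 xy.2 (String.ofList [p.2])
    | none => tbl

def create_encrypted_table (magic_square : List (List Int)) (text : String) : List (List String) :=
  let t := PySem.Str.replace (PySem.Str.upper text) " " ""
  (PySem.List.enumerate t.toList).foldl (pvStep magic_square) pvBlank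

-- ===== PORT B =====
-- Python `magic_square[i][j]`
def pvKey (ms : List (List Int)) (p : Int × Int) : Int :=
  PySem.List.pyGetD (PySem.List.pyGetD ms p.1 []) p.2 0

-- Source B's cell expression: `text[v - 1] if 1 <= v <= n else ""` with n = min(len(text), 16)
-- (the `none` arm is unreachable: 1 ≤ v ≤ len(text) keeps the index in range)
def pvCellVal (cs : List Char) (v : Int) : String :=
  if 1 ≤ v ∧ v ≤ min (PySem.List.len cs) 16 then
    match PySem.List.pyGet? cs (v - 1) with
    | some c => String.ofList [c]
    | none => ""
  else ""

def create_encrypted_table_alt (magic_square : List (List Int)) (text : String) : List (List String) :=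
  let t := PySem.Str.replace (PySem.Str.upper text) " " ""
  (PySem.List.pyRange 0 4 1).map (fun i =>
    (PySem.List.pyRange 0 4 1).map (fun j =>
      pvCellVal t.toList (pvKey magic_square (i, j))))

-- ===== PRECONDITION & SPEC =====
-- the cleaned text A and B both work on
def pvClean (text : String) : List Char :=
  (PySem.Str.replace (PySem.Str.upper text) " " "").toList
-- the 16 values of the top-left 4×4 block of the grid, row-major
def pvGrid (ms : List (List Int)) : List Int :=
  ((ms.take 4).map (fun r => r.take 4)).flatten
-- Pre_ requires a 4×4 grid (A raises IndexError otherwise) in which each needed value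
-- k ∈ 1..min(len(cleaned text),16) occurs EXACTLY once: if k is missing A raises KeyError,
-- and if k is duplicated A's last-insertion-wins placement is an accident of its dict
-- (B fills every cell carrying k).
def Pre_create_encrypted_table (magic_square : List (List Int)) (text : String) : Prop :=
  4 ≤ magic_square.length ∧ (∀ r ∈ magic_square.take 4, 4 ≤ r.length) ∧
  ∀ j ∈ List.range 16, ((j : Int) + 1 ≤ min (PySem.List.len (pvClean text)) 16 →
    (pvGrid magic_square).count ((j : Int) + 1) = 1)
instance (magic_square : List (List Int)) (text : String) : Decidable (Pre_create_encrypted_table magic_square text) := by unfold Pre_create_encrypted_table; infer_instance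
def pvWitness_create_encrypted_table : List (List Int) × String :=
  ([[1, 2, 3, 4], [5, 6, 7, 8], [9, 10, 11, 12], [13, 14, 15, 16]], "HELLO")

def Spec_create_encrypted_table (magic_square : List (List Int)) (text : String) (out : List (List String)) : Prop := out = create_encrypted_table_alt magic_square text
instance (magic_square : List (List Int)) (text : String) (out : List (List String)) : Decidable (Spec_create_encrypted_table magic_square text out) := by unfold Spec_create_encrypted_table; infer_instance

-- ===== CLAIM (what is proved, stated in full; the proofs are below) =====
def Claim_equal_create_encrypted_table : Prop := ∀ (magic_square : List (List Int)) (text : String), Dom_create_encrypted_table magic_square text → Pre_create_encrypted_table magic_square text → Spec_create_encrypted_table magic_square text (create_encrypted_table magic_square text)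
-- ===== LEMMAS AND PROOFS =====

def pvFoldA (ms : List (List Int)) (cs : List Char) : List (List String) :=
  (PySem.List.enumerate cs).foldl (pvStep ms) pvBlank

def pvAltOf (ms : List (List Int)) (cs : List Char) : List (List String) :=
  (PySem.List.pyRange 0 4 1).map (fun i =>
    (PySem.List.pyRange 0 4 1).map (fun j =>
      pvCellVal cs (pvKey ms (i, j))))

def pvCells : List (Int × Int) :=
  [(0,0),(0,1),(0,2),(0,3),(1,0),(1,1),(1,2),(1,3),(2,0),(2,1),(2,2),(2,3),(3,0),(3,1),(3,2),(3,3)]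

def pvRead (tbl : List (List String)) (i j : Nat) : String := (tbl.getD i []).getD j ""

def pvShape (tbl : List (List String)) : Prop := tbl.length = 4 ∧ ∀ r ∈ tbl, r.length = 4

lemma pv_portA_eq (ms : List (List Int)) (text : String) :
    create_encrypted_table ms text = pvFoldA ms (pvClean text) := rfl

lemma pv_portB_eq (ms : List (List Int)) (text : String) :
    create_encrypted_table_alt ms text = pvAltOf ms (pvClean text) := rfl

lemma pv_range4 : PySem.List.pyRange 0 4 1 = [0, 1, 2, 3] := by decide

lemma pv_posMap_eq_cells (ms : List (List Int)) :
    pvPosMap ms = (pvCells.map (fun p => (pvKey ms p, p))).foldl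
      (fun d q => d.insert q.1 q.2) PySem.Dict.empty := by
  simp only [pvPosMap, pvCells, pvKey, pv_range4, List.foldl, List.map]

-- a fold of inserts never touches absent keys
lemma pv_get?_foldl_insert_not_mem {ν : Type} (l : List (Int × ν)) (d : PySem.Dict Int ν)
    (k : Int) (h : k ∉ l.map Prod.fst) :
    (l.foldl (fun d q => d.insert q.1 q.2) d).get? k = d.get? k := by
  induction l generalizing d with
  | nil => rfl
  | cons a l ih =>
    simp only [List.map_cons, List.mem_cons, not_or] at h
    rw [List.foldl_cons, ih _ h.2, PySem.Dict.get?_insert_of_ne d a.2 h.1]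

-- with a unique key occurrence the fold's lookup returns that entry
lemma pv_get?_foldl_insert_count_one {ν : Type} (l : List (Int × ν)) (k : Int) (v : ν)
    (h1 : (l.map Prod.fst).count k = 1) (h2 : (k, v) ∈ l) (d : PySem.Dict Int ν) :
    (l.foldl (fun d q => d.insert q.1 q.2) d).get? k = some v := by
  induction l generalizing d with
  | nil => simp at h2
  | cons a l ih =>
    rcases List.mem_cons.mp h2 with h2' | h2'
    · subst h2'
      simp only [List.map_cons, List.count_cons_self] at h1
      have hnm : k ∉ l.map Prod.fst := by
        intro hm; have := List.count_pos_iff.mpr hm; omega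
      rw [List.foldl_cons, pv_get?_foldl_insert_not_mem l _ k hnm,
        PySem.Dict.get?_insert_self]
    · have hk : k ∈ l.map Prod.fst := List.mem_map.mpr ⟨(k, v), h2', rfl⟩
      have hne : a.1 ≠ k := by
        intro he
        simp only [List.map_cons, he, List.count_cons_self] at h1
        have := List.count_pos_iff.mpr hk; omega
      have h1' : (l.map Prod.fst).count k = 1 := by
        simpa [List.count_cons, hne] using h1
      rw [List.foldl_cons]
      exact ih h1' h2' _

-- count = 1 through a map gives a unique preimage
lemma pv_exists_of_count_one {α β : Type} [DecidableEq β] (l : List α) (f : α → β) (k : β)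
    (h : (l.map f).count k = 1) :
    ∃ p ∈ l, f p = k ∧ ∀ q ∈ l, f q = k → q = p := by
  induction l with
  | nil => simp at h
  | cons a l ih =>
    by_cases ha : f a = k
    · have h0 : (l.map f).count k = 0 := by
        simp only [List.map_cons, ha, List.count_cons_self] at h; omega
      have hnm : ∀ q ∈ l, f q ≠ k := by
        intro q hq he
        have : k ∈ l.map f := List.mem_map.mpr ⟨q, hq, he⟩
        have := List.count_pos_iff.mpr this; omega
      exact ⟨a, List.mem_cons_self, ha, by
        intro q hq he
        rcases List.mem_cons.mp hq with h' | h'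
        · exact h'
        · exact absurd he (hnm q h')⟩
    · have h1 : (l.map f).count k = 1 := by simpa [List.count_cons, ha] using h
      obtain ⟨p, hp, hk, hu⟩ := ih h1
      exact ⟨p, List.mem_cons_of_mem _ hp, hk, by
        intro q hq he
        rcases List.mem_cons.mp hq with h' | h'
        · exact absurd (h' ▸ he) ha
        · exact hu q h' he⟩

lemma pv_posmap_get (ms : List (List Int)) (k : Int)
    (h : (pvCells.map (pvKey ms)).count k = 1) :
    ∃ p ∈ pvCells, pvKey ms p = k ∧ (pvPosMap ms).get? k = some p ∧
      ∀ q ∈ pvCells, pvKey ms q = k → q = p := by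
  obtain ⟨p, hp, hk, hu⟩ := pv_exists_of_count_one pvCells (pvKey ms) k h
  refine ⟨p, hp, hk, ?_, hu⟩
  rw [pv_posMap_eq_cells]
  apply pv_get?_foldl_insert_count_one
  · simpa [List.map_map, Function.comp_def] using h
  · exact List.mem_map.mpr ⟨p, hp, by rw [hk]⟩

lemma pv_cells_bounds : ∀ p ∈ pvCells, 0 ≤ p.1 ∧ p.1 < 4 ∧ 0 ≤ p.2 ∧ p.2 < 4 := by decide

lemma pv_mem_cells (i j : Nat) (hi : i < 4) (hj : j < 4) : ((i : Int), (j : Int)) ∈ pvCells := by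
  interval_cases i <;> interval_cases j <;> decide

lemma pv_pySetD_eq_set {α : Type} (xs : List α) (i : Int) (v : α) (h0 : 0 ≤ i)
    (h : i < (xs.length : Int)) : PySem.List.pySetD xs i v = xs.set i.toNat v := by
  simp only [PySem.List.pySetD, PySem.List.pySet?, PySem.List.pyIdx?, if_pos h0, if_pos h,
    Option.map_some, Option.getD_some]

lemma pv_shape_blank : pvShape pvBlank := by
  refine ⟨rfl, ?_⟩
  intro r hr
  simp only [pvBlank, List.range, List.range.loop, List.map, List.mem_cons,
    List.not_mem_nil, or_false] at hr
  rcases hr with h | h | h | h <;> subst h <;> rfl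

lemma pv_shape_alt (ms : List (List Int)) (cs : List Char) : pvShape (pvAltOf ms cs) := by
  refine ⟨by simp [pvAltOf, pv_range4], ?_⟩
  intro r hr
  simp only [pvAltOf, pv_range4, List.map, List.mem_cons, List.not_mem_nil, or_false] at hr
  rcases hr with h | h | h | h <;> subst h <;> rfl

lemma pv_setCell_eq (tbl : List (List String)) (x y : Int) (c : String)
    (hs : pvShape tbl) (hx0 : 0 ≤ x) (hx : x < 4) (hy0 : 0 ≤ y) (hy : y < 4) :
    pvSetCell tbl x y c = tbl.set x.toNat ((tbl.getD x.toNat []).set y.toNat c) := by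
  have hx4 : x.toNat < tbl.length := by rw [hs.1]; omega
  have hxl : x < (tbl.length : Int) := by rw [hs.1]; exact_mod_cast hx
  have hrow : PySem.List.pyGetD tbl x [] = tbl.getD x.toNat [] := by
    rw [PySem.List.pyGetD_eq_getElem tbl [] hx0 hxl, List.getD_eq_getElem?_getD,
      List.getElem?_eq_getElem hx4, Option.getD_some]
  have hrl : (tbl.getD x.toNat []).length = 4 := by
    rw [List.getD_eq_getElem?_getD, List.getElem?_eq_getElem hx4, Option.getD_some]
    exact hs.2 _ (List.getElem_mem _)
  unfold pvSetCell
  rw [hrow, pv_pySetD_eq_set _ _ _ hy0 (by rw [hrl]; exact_mod_cast hy),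
    pv_pySetD_eq_set _ _ _ hx0 hxl]

lemma pv_shape_setCell (tbl : List (List String)) (x y : Int) (c : String)
    (hs : pvShape tbl) (hx0 : 0 ≤ x) (hx : x < 4) (hy0 : 0 ≤ y) (hy : y < 4) :
    pvShape (pvSetCell tbl x y c) := by
  rw [pv_setCell_eq tbl x y c hs hx0 hx hy0 hy]
  refine ⟨by simp [hs.1], ?_⟩
  intro r hr
  rcases List.mem_or_eq_of_mem_set hr with h | h
  · exact hs.2 r h
  · subst h
    simp only [List.length_set]
    have hx4 : x.toNat < tbl.length := by rw [hs.1]; omega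
    rw [List.getD_eq_getElem?_getD, List.getElem?_eq_getElem hx4, Option.getD_some]
    exact hs.2 _ (List.getElem_mem _)

lemma pv_read_setCell (tbl : List (List String)) (x y : Int) (c : String) (i j : Nat)
    (hs : pvShape tbl) (hx0 : 0 ≤ x) (hx : x < 4) (hy0 : 0 ≤ y) (hy : y < 4)
    (hi : i < 4) (hj : j < 4) :
    pvRead (pvSetCell tbl x y c) i j =
      if i = x.toNat ∧ j = y.toNat then c else pvRead tbl i j := by
  have hx4 : x.toNat < tbl.length := by rw [hs.1]; omega
  have hi4 : i < tbl.length := by rw [hs.1]; omega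
  have hrl : (tbl.getD x.toNat []).length = 4 := by
    rw [List.getD_eq_getElem?_getD, List.getElem?_eq_getElem hx4, Option.getD_some]
    exact hs.2 _ (List.getElem_mem _)
  rw [pv_setCell_eq tbl x y c hs hx0 hx hy0 hy]
  unfold pvRead
  rw [List.getD_eq_getElem?_getD (l := tbl.set x.toNat _), List.getElem?_set]
  by_cases hix : x.toNat = i
  · rw [if_pos hix, if_pos (by omega)]
    simp only [Option.getD_some]
    rw [List.getD_eq_getElem?_getD (l := (tbl.getD x.toNat []).set y.toNat c),
      List.getElem?_set]
    by_cases hjy : y.toNat = j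
    · rw [if_pos hjy, if_pos (by omega), Option.getD_some, if_pos ⟨hix.symm, hjy.symm⟩]
    · rw [if_neg hjy, if_neg (by omega)]
      subst hix
      rfl
  · rw [if_neg hix, if_neg (by omega)]
    rfl

lemma pv_read_alt (ms : List (List Int)) (cs : List Char) (i j : Nat) (hi : i < 4) (hj : j < 4) :
    pvRead (pvAltOf ms cs) i j = pvCellVal cs (pvKey ms ((i : Int), (j : Int))) := by
  interval_cases i <;> interval_cases j <;> rfl

lemma pv_eq_of_read (t1 t2 : List (List String)) (h1 : pvShape t1) (h2 : pvShape t2)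
    (h : ∀ i j, i < 4 → j < 4 → pvRead t1 i j = pvRead t2 i j) : t1 = t2 := by
  apply List.ext_getElem (by rw [h1.1, h2.1])
  intro i hi1 hi2
  apply List.ext_getElem (by rw [h1.2 _ (List.getElem_mem _), h2.2 _ (List.getElem_mem _)])
  intro j hj1 hj2
  have hi4 : i < 4 := by rw [h1.1] at hi1; exact hi1
  have hj4 : j < 4 := by rw [h1.2 _ (List.getElem_mem _)] at hj1; exact hj1
  have e1 : pvRead t1 i j = t1[i][j] := by
    unfold pvRead
    rw [List.getD_eq_getElem?_getD, List.getD_eq_getElem?_getD,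
      List.getElem?_eq_getElem hi1, Option.getD_some,
      List.getElem?_eq_getElem hj1, Option.getD_some]
  have e2 : pvRead t2 i j = t2[i][j] := by
    unfold pvRead
    rw [List.getD_eq_getElem?_getD, List.getD_eq_getElem?_getD,
      List.getElem?_eq_getElem hi2, Option.getD_some,
      List.getElem?_eq_getElem hj2, Option.getD_some]
  rw [← e1, ← e2]
  exact h i j hi4 hj4

lemma pv_cellVal_snoc_ne (cs : List Char) (c : Char) (v : Int)
    (hv : v ≠ (cs.length : Int) + 1) : pvCellVal (cs ++ [c]) v = pvCellVal cs v := by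
  unfold pvCellVal
  simp only [PySem.List.len_eq, List.length_append, List.length_cons, List.length_nil,
    Nat.cast_add, Nat.cast_one]
  by_cases h1 : 1 ≤ v ∧ v ≤ min ((cs.length : Int)) 16
  · rw [if_pos (by omega), if_pos h1,
      PySem.List.pyGet?_of_nonneg _ (by omega), PySem.List.pyGet?_of_nonneg _ (by omega),
      List.getElem?_append_left (by omega)]
  · rw [if_neg (by omega), if_neg h1]

lemma pv_cellVal_snoc_big (cs : List Char) (c : Char) (v : Int) (hL : 16 ≤ cs.length) :
    pvCellVal (cs ++ [c]) v = pvCellVal cs v := by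
  unfold pvCellVal
  simp only [PySem.List.len_eq, List.length_append, List.length_cons, List.length_nil,
    Nat.cast_add, Nat.cast_one]
  by_cases h1 : 1 ≤ v ∧ v ≤ min ((cs.length : Int)) 16
  · rw [if_pos (by omega), if_pos h1,
      PySem.List.pyGet?_of_nonneg _ (by omega), PySem.List.pyGet?_of_nonneg _ (by omega),
      List.getElem?_append_left (by omega)]
  · rw [if_neg (by omega), if_neg h1]

lemma pv_cellVal_snoc_self (cs : List Char) (c : Char) (hL : cs.length < 16) :
    pvCellVal (cs ++ [c]) ((cs.length : Int) + 1) = String.ofList [c] := by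
  unfold pvCellVal
  rw [if_pos (by
    simp only [PySem.List.len_eq, List.length_append, List.length_cons, List.length_nil,
      Nat.cast_add, Nat.cast_one]
    omega)]
  have he : ((cs.length : Int) + 1 - 1) = (cs.length : Int) := by omega
  rw [he, PySem.List.pyGet?_append_length]

lemma pv_step_big (ms : List (List Int)) (tbl : List (List String)) (n : Int) (c : Char)
    (h : (16 : Int) ≤ n) : pvStep ms tbl (n, c) = tbl := by
  unfold pvStep
  rw [show ((n, c).1) = n from rfl, if_pos h]

lemma pv_step_small (ms : List (List Int)) (tbl : List (List String)) (n : Int) (c : Char)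
    (p : Int × Int) (h : ¬ (16 : Int) ≤ n) (hget : (pvPosMap ms).get? (n + 1) = some p) :
    pvStep ms tbl (n, c) = pvSetCell tbl p.1 p.2 (String.ofList [c]) := by
  unfold pvStep
  rw [show ((n, c).1) = n from rfl, show ((n, c).2) = c from rfl, if_neg h, hget]

lemma pv_foldA_snoc (ms : List (List Int)) (cs : List Char) (c : Char) :
    pvFoldA ms (cs ++ [c]) = pvStep ms (pvFoldA ms cs) ((cs.length : Int), c) := by
  simp [pvFoldA, PySem.List.enumerate_append, PySem.List.enumerate_cons, PySem.List.enumerate_nil]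

lemma pv_main (ms : List (List Int)) (cs : List Char)
    (hcnt : ∀ k : Int, 1 ≤ k → k ≤ min (cs.length : Int) 16 →
      (pvCells.map (pvKey ms)).count k = 1) :
    pvFoldA ms cs = pvAltOf ms cs := by
  induction cs using List.reverseRecOn with
  | nil =>
    apply pv_eq_of_read _ _ pv_shape_blank (pv_shape_alt ms [])
    intro i j hi hj
    rw [pv_read_alt ms [] i j hi hj]
    have hb : pvRead pvBlank i j = "" := by
      interval_cases i <;> interval_cases j <;> rfl
    rw [hb]
    unfold pvCellVal
    rw [if_neg (by simp only [PySem.List.len_eq, List.length_nil]; omega)]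
  | append_singleton cs c ih =>
    have hcnt' : ∀ k : Int, 1 ≤ k → k ≤ min (cs.length : Int) 16 →
        (pvCells.map (pvKey ms)).count k = 1 := by
      intro k h1 h2
      apply hcnt k h1
      simp only [List.length_append, List.length_cons, List.length_nil, Nat.cast_add,
        Nat.cast_one]
      omega
    have ihv := ih hcnt'
    rw [pv_foldA_snoc, ihv]
    by_cases hL : 16 ≤ cs.length
    · rw [pv_step_big ms _ _ c (by exact_mod_cast hL)]
      apply pv_eq_of_read _ _ (pv_shape_alt ms cs) (pv_shape_alt ms (cs ++ [c]))
      intro i j hi hj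
      rw [pv_read_alt ms cs i j hi hj, pv_read_alt ms (cs ++ [c]) i j hi hj,
        pv_cellVal_snoc_big cs c _ hL]
    · have hL' : cs.length < 16 := by omega
      have hk := hcnt ((cs.length : Int) + 1) (by omega)
        (by simp only [List.length_append, List.length_cons, List.length_nil, Nat.cast_add,
          Nat.cast_one]; omega)
      obtain ⟨p, hp, hkey, hget, huniq⟩ := pv_posmap_get ms _ hk
      rw [pv_step_small ms _ _ c p (by omega) hget]
      obtain ⟨hp1, hp2, hp3, hp4⟩ := pv_cells_bounds p hp
      apply pv_eq_of_read _ _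
        (pv_shape_setCell _ _ _ _ (pv_shape_alt ms cs) hp1 hp2 hp3 hp4)
        (pv_shape_alt ms (cs ++ [c]))
      intro i j hi hj
      rw [pv_read_setCell _ _ _ _ i j (pv_shape_alt ms cs) hp1 hp2 hp3 hp4 hi hj,
        pv_read_alt ms (cs ++ [c]) i j hi hj]
      by_cases hij : i = p.1.toNat ∧ j = p.2.toNat
      · rw [if_pos hij]
        have hpe : ((i : Int), (j : Int)) = p := by
          obtain ⟨rfl, rfl⟩ := hij
          exact Prod.ext (by omega) (by omega)
        rw [hpe, hkey, pv_cellVal_snoc_self cs c hL']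
      · rw [if_neg hij]
        have hne : pvKey ms ((i : Int), (j : Int)) ≠ (cs.length : Int) + 1 := by
          intro he
          have hq := huniq _ (pv_mem_cells i j hi hj) he
          rw [Prod.ext_iff] at hq
          apply hij
          constructor <;> omega
        rw [pv_cellVal_snoc_ne cs c _ hne, pv_read_alt ms cs i j hi hj]

lemma pv_grid_eq (ms : List (List Int)) (hlen : 4 ≤ ms.length)
    (hrows : ∀ r ∈ ms.take 4, 4 ≤ r.length) :
    pvGrid ms = pvCells.map (pvKey ms) := by
  obtain ⟨r0, r1, r2, r3, rest, rfl⟩ :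
      ∃ r0 r1 r2 r3 rest, ms = r0 :: r1 :: r2 :: r3 :: rest := by
    rcases ms with _ | ⟨a, _ | ⟨b, _ | ⟨c, _ | ⟨d, e⟩⟩⟩⟩ <;> simp at hlen
    exact ⟨_, _, _, _, _, rfl⟩
  have h0 := hrows r0 (by simp)
  have h1 := hrows r1 (by simp)
  have h2 := hrows r2 (by simp)
  have h3 := hrows r3 (by simp)
  obtain ⟨a0, a1, a2, a3, t0, rfl⟩ :
      ∃ a0 a1 a2 a3 t0, r0 = a0 :: a1 :: a2 :: a3 :: t0 := by
    rcases r0 with _ | ⟨a, _ | ⟨b, _ | ⟨c, _ | ⟨d, e⟩⟩⟩⟩ <;> simp at h0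
    exact ⟨_, _, _, _, _, rfl⟩
  obtain ⟨b0, b1, b2, b3, t1, rfl⟩ :
      ∃ b0 b1 b2 b3 t1, r1 = b0 :: b1 :: b2 :: b3 :: t1 := by
    rcases r1 with _ | ⟨a, _ | ⟨b, _ | ⟨c, _ | ⟨d, e⟩⟩⟩⟩ <;> simp at h1
    exact ⟨_, _, _, _, _, rfl⟩
  obtain ⟨c0, c1, c2, c3, t2, rfl⟩ :
      ∃ c0 c1 c2 c3 t2, r2 = c0 :: c1 :: c2 :: c3 :: t2 := by
    rcases r2 with _ | ⟨a, _ | ⟨b, _ | ⟨c, _ | ⟨d, e⟩⟩⟩⟩ <;> simp at h2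
    exact ⟨_, _, _, _, _, rfl⟩
  obtain ⟨d0, d1, d2, d3, t3, rfl⟩ :
      ∃ d0 d1 d2 d3 t3, r3 = d0 :: d1 :: d2 :: d3 :: t3 := by
    rcases r3 with _ | ⟨a, _ | ⟨b, _ | ⟨c, _ | ⟨d, e⟩⟩⟩⟩ <;> simp at h3
    exact ⟨_, _, _, _, _, rfl⟩
  simp [pvGrid, pvCells, pvKey, PySem.List.pyGetD_ofNat']

-- ===== VERDICT (by name: the statement is the Claim_ definition above) =====
set_option maxHeartbeats 1000000 in
theorem create_encrypted_table_spec : Claim_equal_create_encrypted_table := by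
  intro ms text _ hpre
  show create_encrypted_table ms text = create_encrypted_table_alt ms text
  rw [pv_portA_eq, pv_portB_eq]
  apply pv_main
  intro k h1 h2
  have hk16 : k ≤ 16 := le_trans h2 (min_le_right _ _)
  have hcnt := hpre.2.2 (k - 1).toNat (List.mem_range.mpr (by omega))
  rw [← pv_grid_eq ms hpre.1 hpre.2.1]
  have he : (((k - 1).toNat : Int)) + 1 = k := by omega
  rw [he] at hcnt
  apply hcnt
  rw [PySem.List.len_eq]
  exact h2
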